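-- pv_equiv track=rewrite | github.com/andreistreltsov/code | aoc-2023/day03/part1.py | nums_in_line
-- ===== SOURCE A (Python) =====
-- import itertools
--
-- def nums_in_line(line):
--     digits = []
--     for i,c in enumerate(itertools.chain(line, '\n')):
--         if c.isdigit():
--             digits.append(c)
--         elif digits:
--             number = int(''.join(d for d in digits))
--             start_idx = i-len(digits)
--             yield (start_idx, number, len(digits))
--             digits.clear()
-- ===== SOURCE B (Python) =====
-- def nums_in_line(line):
--     n = len(line)
--     i = 0
--     while i < n:
--         if line[i].isdigit():
--             j = i + 1
--             while j < n and line[j].isdigit():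
--                 j += 1
--             yield (i, int(line[i:j]), j - i)
--             i = j
--         else:
--             i += 1
-- ===== Notes on version B (the rewrite author's own statement) =====
-- stated objective: alternative
-- what changed: Replaced the enumerate-over-chain-with-newline-sentinel loop that accumulates a digits buffer and flushes it on each non-digit by a two-pointer index scan: find the start of a digit run, advance a second index past the run, yield (start, int(slice), length) directly from the slice; no buffer, no sentinel, no join.
import Mathlib
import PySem

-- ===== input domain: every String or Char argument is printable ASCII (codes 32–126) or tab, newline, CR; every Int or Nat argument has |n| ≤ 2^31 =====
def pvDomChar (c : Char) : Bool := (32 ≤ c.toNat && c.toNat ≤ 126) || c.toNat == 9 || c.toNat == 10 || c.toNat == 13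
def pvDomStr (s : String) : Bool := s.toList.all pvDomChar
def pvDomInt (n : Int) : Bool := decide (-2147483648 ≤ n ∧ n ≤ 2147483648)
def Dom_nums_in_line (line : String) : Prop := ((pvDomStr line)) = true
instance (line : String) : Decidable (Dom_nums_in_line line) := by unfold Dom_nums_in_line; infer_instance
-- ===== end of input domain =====

-- B replaces A's buffer-and-sentinel accumulation loop by a two-pointer run scan; same values, alternative structure.
-- A is a generator; the equivalence is about the list of yielded values.

-- ===== PORT A =====
-- for i,c in enumerate(chain(line, newline sentinel)) as structural recursion over the remaining
-- characters, carrying the running index i, the digits buffer, and the yields so far.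
-- int(''.join(digits)) is PySem.Int.ofStr?; its .getD 0 default is unreachable (the
-- buffer is a nonempty digit string whenever it is read).
def numsLoopA : List Char → Int → List Char → List (Int × Int × Int) → List (Int × Int × Int)
  | [], _, _, acc => acc
  | c :: rest, i, digits, acc =>
    if PySem.Chars.isdigit c then
      numsLoopA rest (i + 1) (digits ++ [c]) acc
    else if digits ≠ [] then
      numsLoopA rest (i + 1) []
        (acc ++ [(i - digits.length, (PySem.Int.ofStr? (String.ofList digits)).getD 0, (digits.length : Int))])
    else
      numsLoopA rest (i + 1) digits acc

def nums_in_line (line : String) : List (Int × Int × Int) :=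
  numsLoopA (line.toList ++ ['\n']) 0 [] []

-- ===== PORT B =====
-- Source B's outer while over index i: on a digit, the inner while advancing j past the
-- run is List.takeWhile, the slice line[i:j] is that run; int(...) via PySem.Int.ofStr?
-- (unreachable .getD 0 likewise). Recursion on the remaining characters.
def numsScanB : List Char → Int → List (Int × Int × Int)
  | [], _ => []
  | c :: rest, i =>
    if ('0' ≤ c && c ≤ '9') then
      let run := (c :: rest).takeWhile (fun d => '0' ≤ d && d ≤ '9')
      (i, (PySem.Int.ofStr? (String.ofList run)).getD 0, (run.length : Int)) ::
        numsScanB ((c :: rest).drop run.length) (i + run.length)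
    else
      numsScanB rest (i + 1)
termination_by cs _ => cs.length
decreasing_by
  · simp only [List.takeWhile_cons, *, if_pos]
    simp only [List.drop_succ_cons, List.length_cons, List.length_drop]
    have := (List.takeWhile_sublist (p := fun d => '0' ≤ d && d ≤ '9') (l := rest)).length_le
    omega
  · simp

def nums_in_line_alt (line : String) : List (Int × Int × Int) :=
  numsScanB line.toList 0

-- ===== PRECONDITION & SPEC =====
def Spec_nums_in_line (line : String) (out : List (Int × Int × Int)) : Prop := out = nums_in_line_alt line
instance (line : String) (out : List (Int × Int × Int)) : Decidable (Spec_nums_in_line line out) := by unfold Spec_nums_in_line; infer_instance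

-- ===== CLAIM (what is proved, stated in full; the proofs are below) =====
def Claim_equal_nums_in_line : Prop := ∀ (line : String), Dom_nums_in_line line → Spec_nums_in_line line (nums_in_line line)

-- ===== LEMMAS AND PROOFS =====

theorem isdigit_eq (c : Char) : PySem.Chars.isdigit c = ('0' ≤ c && c ≤ '9') := by
  simp [PySem.Chars.isdigit]

theorem numsLoopA_acc (cs : List Char) : ∀ (i : Int) (d : List Char) (acc : List (Int × Int × Int)),
    numsLoopA cs i d acc = acc ++ numsLoopA cs i d [] := by
  induction cs with
  | nil => intro i d acc; simp [numsLoopA]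
  | cons c rest ih =>
    intro i d acc
    simp only [numsLoopA]
    split_ifs with h1 h2
    · rw [ih, ih (i+1) (d ++ [c]) []]
    · rw [ih (i+1) [] (acc ++ [(i - d.length, (PySem.Int.ofStr? (String.ofList d)).getD 0, (d.length : Int))]),
          ih (i+1) [] ([] ++ [(i - d.length, (PySem.Int.ofStr? (String.ofList d)).getD 0, (d.length : Int))])]
      simp
    · rw [ih, ih (i+1) d []]

theorem takeWhile_all_append {p : Char → Bool} (d : List Char) (c : Char) (cs : List Char)
    (hd : ∀ x ∈ d, p x = true) (hc : p c = false) :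
    (d ++ c :: cs).takeWhile p = d ∧ (d ++ c :: cs).drop d.length = c :: cs := by
  constructor
  · induction d with
    | nil => simp [hc]
    | cons x xs ih =>
      have hx : p x = true := hd x (by simp)
      simp only [List.cons_append, List.takeWhile_cons, hx, if_pos]
      rw [ih (fun y hy => hd y (by simp [hy]))]
  · simp

theorem numsLoopA_eq_scan (cs : List Char) : ∀ (i : Int) (d : List Char),
    (∀ x ∈ d, ('0' ≤ x && x ≤ '9') = true) →
    numsLoopA (cs ++ ['\n']) i d [] = numsScanB (d ++ cs) (i - d.length) := by
  induction cs with
  | nil =>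
    intro i d hd
    cases d with
    | nil => simp [numsLoopA, numsScanB, isdigit_eq]
    | cons x xs =>
      have hx := hd x (by simp)
      have hrun : (x :: xs).takeWhile (fun d => '0' ≤ d && d ≤ '9') = x :: xs := by
        rw [List.takeWhile_eq_self_iff]; exact hd
      simp only [List.nil_append, List.append_nil, numsLoopA, isdigit_eq]
      rw [numsScanB]
      simp only [hx, hrun, if_pos, List.drop_length]
      rw [numsScanB]
      simp
  | cons c rest ih =>
    intro i d hd
    by_cases hc : ('0' ≤ c && c ≤ '9') = true
    · have step : numsLoopA ((c :: rest) ++ ['\n']) i d [] =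
          numsLoopA (rest ++ ['\n']) (i + 1) (d ++ [c]) [] := by
        simp [numsLoopA, isdigit_eq, hc]
      rw [step, ih (i+1) (d ++ [c]) (by intro x hx; rcases List.mem_append.1 hx with h | h
                                        · exact hd x h
                                        · simp at h; subst h; exact hc)]
      have : (i + 1) - ((d ++ [c]).length : Int) = i - d.length := by
        simp
      rw [this, List.append_assoc]; rfl
    · have hcf : ('0' ≤ c && c ≤ '9') = false := by
        cases h : ('0' ≤ c && c ≤ '9') <;> simp_all
      obtain ⟨htw, hdr⟩ := takeWhile_all_append d c rest hd hcf
      cases d with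
      | nil =>
        have step : numsLoopA ((c :: rest) ++ ['\n']) i [] [] =
            numsLoopA (rest ++ ['\n']) (i + 1) [] [] := by
          simp [numsLoopA, isdigit_eq, hcf]
        rw [step, ih (i+1) [] (by simp)]
        simp only [List.nil_append]
        rw [numsScanB]
        simp [hcf]
      | cons x xs =>
        have step : numsLoopA ((c :: rest) ++ ['\n']) i (x :: xs) [] =
            [(i - ((x :: xs).length : Int), (PySem.Int.ofStr? (String.ofList (x :: xs))).getD 0, ((x :: xs).length : Int))]
              ++ numsLoopA (rest ++ ['\n']) (i + 1) [] [] := by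
          simp only [List.cons_append, numsLoopA, isdigit_eq, hcf]
          simp only [Bool.false_eq_true, if_false, ne_eq, reduceCtorEq, not_false_eq_true, if_pos]
          rw [numsLoopA_acc]
          simp
        rw [step, ih (i+1) [] (by simp)]
        have hx := hd x (by simp)
        have rhs1 : numsScanB ((x :: xs) ++ c :: rest) (i - ((x :: xs).length : Int)) =
            (i - ((x :: xs).length : Int), (PySem.Int.ofStr? (String.ofList (x :: xs))).getD 0, ((x :: xs).length : Int)) ::
              numsScanB (c :: rest) (i - ((x :: xs).length : Int) + ((x :: xs).length : Int)) := by
          conv_lhs => rw [List.cons_append, numsScanB]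
          simp only [hx]
          rw [← List.cons_append] at *
          simp only [htw, hdr, if_pos]
        have rhs2 : numsScanB (c :: rest) i = numsScanB rest (i + 1) := by
          rw [numsScanB]; simp [hcf]
        rw [rhs1]
        have : i - ((x :: xs).length : Int) + ((x :: xs).length : Int) = i := by ring
        rw [this, rhs2]
        simp

-- ===== VERDICT (by name: the statement is the Claim_ definition above) =====
theorem nums_in_line_spec : Claim_equal_nums_in_line := by
  intro line _
  unfold Spec_nums_in_line nums_in_line nums_in_line_alt
  have := numsLoopA_eq_scan line.toList 0 [] (by simp)
  simpa using this
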